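-- pv_equiv track=rewrite | github.com/jpmor/ga-cli | ga/legis/bills.py | _heal_page_breaks
-- ===== SOURCE A (Python) =====
-- def _heal_page_breaks(raw_lines: list[str]) -> list[str]:
--     """Skip blank runs that are mid-sentence page breaks (next line starts lowercase)."""
--     merged: list[str] = []
--     i = 0
--     while i < len(raw_lines):
--         line = raw_lines[i]
--         if not line and merged and merged[-1]:
--             j = i
--             while j < len(raw_lines) and not raw_lines[j]:
--                 j += 1
--             if j < len(raw_lines) and raw_lines[j][0].islower():
--                 i = j
--                 continue
--         merged.append(line)
--         i += 1
--     return merged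
-- ===== SOURCE B (Python) =====
-- def _heal_page_breaks(raw_lines: list[str]) -> list[str]:
--     """Skip blank runs that are mid-sentence page breaks (next line starts lowercase)."""
--     # Single reverse pass: carry whether the nearest following non-blank line
--     # starts lowercase; drop each blank line exactly when it does.
--     out: list[str] = []
--     next_lower = False
--     for line in reversed(raw_lines):
--         if line:
--             out.append(line)
--             next_lower = line[0].islower()
--         elif not next_lower:
--             out.append(line)
--     out.reverse()
--     # A blank run at the very start of the list is never a page break: restore it.
--     k = 0
--     while k < len(raw_lines) and not raw_lines[k]:
--         k += 1
--     if k and (not out or out[0]):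
--         out[:0] = [""] * k
--     return out
-- ===== Notes on version B (the rewrite author's own statement) =====
-- stated objective: alternative
-- what changed: Replaces A's forward scan with an inner lookahead loop and merged[-1] check by a single reverse pass that carries one flag (does the nearest following non-blank line start lowercase) and drops blanks on the fly, followed by restoring a leading blank run.
import Mathlib
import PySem

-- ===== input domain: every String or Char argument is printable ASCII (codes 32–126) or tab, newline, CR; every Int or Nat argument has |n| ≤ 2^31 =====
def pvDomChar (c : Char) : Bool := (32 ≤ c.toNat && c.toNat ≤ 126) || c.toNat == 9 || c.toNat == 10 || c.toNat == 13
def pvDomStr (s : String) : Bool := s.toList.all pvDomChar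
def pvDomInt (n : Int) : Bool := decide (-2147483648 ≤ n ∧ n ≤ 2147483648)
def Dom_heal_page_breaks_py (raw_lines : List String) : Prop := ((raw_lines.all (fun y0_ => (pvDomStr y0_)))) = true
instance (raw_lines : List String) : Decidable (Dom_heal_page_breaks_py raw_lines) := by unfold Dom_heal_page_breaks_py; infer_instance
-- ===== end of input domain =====

-- B replaces A's forward scan with inner lookahead (and merged[-1] check) by a single
-- reverse pass that carries one flag — whether the nearest following non-blank line starts
-- lowercase — plus a restore of a leading blank run; objective: alternative, same O(n) cost.

-- `s[0].islower()` on a non-empty string (both sources perform this exact test)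
def pvStartsLower (s : String) : Bool :=
  match s.toList with
  | c :: _ => PySem.Chars.islower c
  | [] => false

-- `j < len(raw_lines) and raw_lines[j][0].islower()` (A's lookahead test)
def pvNextLower (l : List String) : Bool :=
  match l with
  | x :: _ => pvStartsLower x
  | [] => false

-- ===== PORT A =====
-- A's while-loop over index i, transliterated as recursion on the remaining suffix with a
-- reversed accumulator (merged[-1] = head of acc); the inner `while j …` scan is dropWhile.
def healGoA (acc : List String) (rest : List String) : List String :=
  match rest with
  | [] => acc.reverse
  | line :: tl =>
    if (line == "") && (match acc with | a :: _ => a != "" | [] => false) then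
      let rest' := tl.dropWhile (fun x => x == "")
      if pvNextLower rest' then
        healGoA acc rest'          -- i = j; continue
      else
        healGoA (line :: acc) tl   -- merged.append(line); i += 1
    else
      healGoA (line :: acc) tl     -- merged.append(line); i += 1
termination_by rest.length
decreasing_by
  · exact Nat.lt_succ_of_le (List.length_dropWhile_le _ _)
  · simp
  · simp

def heal_page_breaks_py (raw_lines : List String) : List String :=
  healGoA [] raw_lines

-- ===== PORT B =====
-- Source B's loop body over `reversed(raw_lines)`: `out.append` is cons (out is built in
-- reverse order and reversed at the end, so the cons-accumulator IS the final order).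
def healStepB (st : List String × Bool) (line : String) : List String × Bool :=
  if line ≠ "" then (line :: st.1, pvStartsLower line)
  else if !st.2 then (line :: st.1, st.2)
  else st

-- Source B: reverse pass, then restore a dropped leading blank run (`k` blanks) if any.
def heal_page_breaks_py_alt (raw_lines : List String) : List String :=
  let out := (raw_lines.reverse.foldl healStepB ([], false)).1
  let k := (raw_lines.takeWhile (fun x => x == "")).length
  if (k != 0) && (match out with | [] => true | x :: _ => x != "") then
    List.replicate k "" ++ out
  else out

-- ===== PRECONDITION & SPEC =====
def Spec_heal_page_breaks_py (raw_lines : List String) (out : List String) : Prop := out = heal_page_breaks_py_alt raw_lines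
instance (raw_lines : List String) (out : List String) : Decidable (Spec_heal_page_breaks_py raw_lines out) := by unfold Spec_heal_page_breaks_py; infer_instance

-- ===== CLAIM (what is proved, stated in full; the proofs are below) =====
def Claim_equal_heal_page_breaks_py : Prop := ∀ (raw_lines : List String), Dom_heal_page_breaks_py raw_lines → Spec_heal_page_breaks_py raw_lines (heal_page_breaks_py raw_lines)

-- ===== LEMMAS AND PROOFS =====

-- Common specification both ports are reduced to: run-based recursion (proof-only helper);
-- b = "we are at the very start of the list" (a leading run is never dropped).
def hs (b : Bool) (l : List String) : List String :=
  match l with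
  | [] => []
  | line :: tl =>
    if _h : line = "" then
      (if !b && pvNextLower (tl.dropWhile (fun x => x == "")) then []
       else line :: tl.takeWhile (fun x => x == "")) ++
        hs false (tl.dropWhile (fun x => x == ""))
    else line :: hs false tl
termination_by l.length
decreasing_by
  · exact Nat.lt_succ_of_le (List.length_dropWhile_le _ _)
  · simp

theorem hs_nil (b : Bool) : hs b [] = [] := by rw [hs]

theorem hs_cons_ne (b : Bool) (line : String) (tl : List String) (h : line ≠ "") :
    hs b (line :: tl) = line :: hs false tl := by
  rw [hs]; simp [h]

theorem hs_blank (b : Bool) (tl : List String) :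
    hs b ("" :: tl) =
      (if (!b && pvNextLower (tl.dropWhile (fun x => x == ""))) then []
       else "" :: tl.takeWhile (fun x => x == "")) ++
        hs false (tl.dropWhile (fun x => x == "")) := by
  rw [hs]; simp

theorem dropWhile_head_ne (p : String → Bool) :
    ∀ (l : List String) (x : String) (xs : List String),
      l.dropWhile p = x :: xs → p x = false := by
  intro l
  induction l with
  | nil => intro x xs h; simp at h
  | cons a as ih =>
    intro x xs h
    by_cases hp : p a
    · rw [List.dropWhile_cons_of_pos hp] at h; exact ih _ _ h
    · rw [List.dropWhile_cons_of_neg hp] at h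
      cases h; simpa using hp

theorem goA_blanks :
    ∀ (run : List String), (∀ x ∈ run, x = "") →
      ∀ (acc tl : List String),
        healGoA ("" :: acc) (run ++ tl) = healGoA (run.reverse ++ "" :: acc) tl := by
  intro run
  induction run with
  | nil => intro _ acc tl; simp
  | cons l ls ih =>
    intro h acc tl
    have hl : l = "" := h l (by simp)
    subst hl
    rw [List.cons_append, healGoA]
    rw [if_neg (by simp)]
    rw [ih (fun x hx => h x (by simp [hx])) ("" :: acc) tl]
    simp

theorem healGoA_nil (acc : List String) : healGoA acc [] = acc.reverse := by
  rw [healGoA]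

theorem healGoA_cons (acc : List String) (line : String) (tl : List String) :
    healGoA acc (line :: tl) =
      if (line == "") && (match acc with | a :: _ => a != "" | [] => false) then
        (if pvNextLower (tl.dropWhile (fun x => x == "")) then
          healGoA acc (tl.dropWhile (fun x => x == ""))
         else healGoA (line :: acc) tl)
      else healGoA (line :: acc) tl := by
  rw [healGoA.eq_def]

-- A's loop equals the run-based specification hs.
theorem main_lemma :
    ∀ (n : ℕ) (rest acc : List String), rest.length ≤ n →
      (match acc with | a :: _ => a ≠ "" | [] => True) →
      healGoA acc rest = acc.reverse ++ hs acc.isEmpty rest := by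
  intro n
  induction n with
  | zero =>
    intro rest acc hlen _
    have : rest = [] := List.length_eq_zero_iff.mp (Nat.le_zero.mp hlen)
    subst this
    simp [healGoA_nil, hs_nil]
  | succ n ih =>
    intro rest acc hlen hinv
    match rest with
    | [] => simp [healGoA_nil, hs_nil]
    | line :: tl =>
      have htl : tl.length ≤ n := by simpa using hlen
      by_cases hline : line = ""
      · subst hline
        have hRD : tl.takeWhile (fun x => x == "") ++ tl.dropWhile (fun x => x == "") = tl :=
          List.takeWhile_append_dropWhile
        have hRblank : ∀ x ∈ tl.takeWhile (fun x => x == ""), x = "" := by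
          intro x hx
          simpa using List.mem_takeWhile_imp hx
        have hDlen : (tl.dropWhile (fun x => x == "")).length ≤ tl.length :=
          List.length_dropWhile_le _ _
        rw [hs_blank]
        match acc, hinv with
        | [], _ =>
          rw [healGoA_cons, if_neg (by decide)]
          simp only [List.isEmpty_nil, Bool.not_true, Bool.false_and, Bool.false_eq_true, if_false]
          conv_lhs => rw [← hRD]
          rw [goA_blanks _ hRblank]
          match hD : tl.dropWhile (fun x => x == "") with
          | [] => simp [healGoA_nil, hs_nil]
          | x :: xs =>
            have hx : x ≠ "" := by
              have := dropWhile_head_ne (fun x => x == "") tl x xs hD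
              simpa using this
            rw [healGoA_cons, if_neg (by simp [hx])]
            have hxs : xs.length ≤ n := by
              have : (x :: xs).length ≤ tl.length := hD ▸ hDlen
              simp at this; omega
            rw [ih xs (x :: ((tl.takeWhile (fun x => x == "")).reverse ++ [""])) hxs (by simpa using hx)]
            rw [hs_cons_ne _ _ _ hx]
            simp
        | a :: acc', ha =>
          rw [healGoA_cons, if_pos (by simp [ha])]
          by_cases hd : pvNextLower (tl.dropWhile (fun x => x == "")) = true
          · rw [if_pos hd]
            rw [ih (tl.dropWhile (fun x => x == "")) (a :: acc') (le_trans hDlen htl) (by simpa using ha)]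
            simp [hd]
          · have hd' : pvNextLower (tl.dropWhile (fun x => x == "")) = false := by
              simpa using hd
            rw [if_neg hd]
            simp only [hd', Bool.and_false, Bool.false_eq_true, if_false]
            conv_lhs => rw [← hRD]
            rw [goA_blanks _ hRblank]
            match hD : tl.dropWhile (fun x => x == "") with
            | [] => simp [healGoA_nil, hs_nil]
            | x :: xs =>
              have hx : x ≠ "" := by
                have := dropWhile_head_ne (fun x => x == "") tl x xs hD
                simpa using this
              rw [healGoA_cons, if_neg (by simp [hx])]
              have hxs : xs.length ≤ n := by
                have : (x :: xs).length ≤ tl.length := hD ▸ hDlen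
                simp at this; omega
              rw [ih xs (x :: ((tl.takeWhile (fun x => x == "")).reverse ++ "" :: a :: acc')) hxs (by simpa using hx)]
              rw [hs_cons_ne _ _ _ hx]
              simp
      · rw [healGoA_cons, if_neg (by simp [hline])]
        rw [ih tl (line :: acc) htl (by simpa using hline)]
        rw [hs_cons_ne _ _ _ hline]
        simp

-- ===== B-side lemmas =====

-- structural form of B's reverse-foldl
def healB' : List String → List String × Bool
  | [] => ([], false)
  | line :: tl => healStepB (healB' tl) line

theorem foldl_reverse_eq_healB' (l : List String) :
    l.reverse.foldl healStepB ([], false) = healB' l := by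
  rw [List.foldl_reverse]
  induction l with
  | nil => rfl
  | cons x xs ih => simp [healB', List.foldr_cons, ih]

-- at an interior position, one leading blank is dropped iff the flag holds
theorem hs_false_blank_step (tl : List String) :
    hs false ("" :: tl) =
      (if pvNextLower (tl.dropWhile (fun x => x == "")) then [] else [""]) ++ hs false tl := by
  match tl with
  | [] => simp [hs_blank, hs_nil, pvNextLower]
  | x :: xs =>
    by_cases hx : x = ""
    · subst hx
      rw [hs_blank, hs_blank]
      simp only [List.dropWhile_cons, List.takeWhile_cons, beq_self_eq_true, if_true,
        Bool.not_false]
      by_cases hf : pvNextLower (xs.dropWhile (fun x => x == "")) = true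
      · simp [hf]
      · simp only [Bool.not_eq_true] at hf
        simp [hf]
    · rw [hs_blank, hs_cons_ne _ _ _ hx]
      have hb : (x == "") = false := by simpa using hx
      simp only [List.dropWhile_cons, List.takeWhile_cons, hb, if_false]
      by_cases hf : pvNextLower (x :: xs) = true
      · simp [hf, hs_cons_ne _ _ _ hx]
      · simp only [Bool.not_eq_true] at hf
        simp [hf, hs_cons_ne _ _ _ hx]

-- B's reverse pass computes hs false together with the carried flag
theorem healB'_eq (l : List String) :
    healB' l = (hs false l, pvNextLower (l.dropWhile (fun x => x == ""))) := by
  induction l with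
  | nil => simp [healB', hs_nil, pvNextLower]
  | cons line tl ih =>
    by_cases hline : line = ""
    · subst hline
      rw [healB', ih, healStepB]
      simp only [ne_eq, not_true_eq_false, if_false]
      rw [hs_false_blank_step]
      simp only [List.dropWhile_cons, beq_self_eq_true, if_true]
      by_cases hf : pvNextLower (tl.dropWhile (fun x => x == "")) = true
      · simp [hf]
      · simp only [Bool.not_eq_true] at hf
        simp [hf]
    · rw [healB', ih, healStepB, if_pos hline]
      have hb : (line == "") = false := by simpa using hline
      rw [hs_cons_ne _ _ _ hline]
      simp [hb, pvNextLower]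

-- the blank prefix is literally replicate-many ""
theorem takeWhile_blank_replicate (tl : List String) :
    tl.takeWhile (fun x => x == "") =
      List.replicate (tl.takeWhile (fun x => x == "")).length "" := by
  apply List.eq_replicate_of_mem
  intro x hx
  simpa using List.mem_takeWhile_imp hx

-- B = hs true
theorem alt_eq_hs (raw : List String) : heal_page_breaks_py_alt raw = hs true raw := by
  unfold heal_page_breaks_py_alt
  rw [foldl_reverse_eq_healB', healB'_eq]
  match raw with
  | [] => simp [hs_nil]
  | line :: tl =>
    by_cases hline : line = ""
    · subst hline
      rw [hs_blank, hs_blank]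
      simp only [Bool.not_true, Bool.false_and, Bool.not_false, Bool.true_and,
        Bool.false_eq_true, if_false, List.takeWhile_cons, beq_self_eq_true, if_true]
      by_cases hf : pvNextLower (tl.dropWhile (fun x => x == "")) = true
      · -- dropped by the reverse pass; restored by the fixup
        rw [if_pos hf]
        match hD : tl.dropWhile (fun x => x == "") with
        | [] => simp [pvNextLower, hD] at hf
        | x :: xs =>
          have hx : x ≠ "" := by
            have := dropWhile_head_ne (fun x => x == "") tl x xs hD
            simpa using this
          rw [hs_cons_ne _ _ _ hx]
          simp only [List.nil_append]
          have hcond : ((tl.takeWhile (fun x => x == "")).length + 1 != 0) &&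
              (x != "") = true := by
            simp [hx]
          rw [if_pos (by simpa using hcond)]
          simp only [List.length_cons, List.replicate_succ]
          rw [← takeWhile_blank_replicate]
      · simp only [Bool.not_eq_true] at hf
        rw [if_neg (by simp [hf])]
        simp [hf]
    · have hb : (line == "") = false := by simpa using hline
      simp only [List.takeWhile_cons, hb]
      rw [hs_cons_ne _ _ _ hline, hs_cons_ne _ _ _ hline]
      simp

-- ===== VERDICT (by name: the statement is the Claim_ definition above) =====
theorem heal_page_breaks_py_spec : Claim_equal_heal_page_breaks_py := by
  intro raw _
  unfold Spec_heal_page_breaks_py heal_page_breaks_py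
  rw [alt_eq_hs]
  have := main_lemma raw.length raw [] le_rfl (by trivial)
  simpa using this
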